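-- pv_equiv track=rewrite | github.com/lawn-managers/jiminu | programmers/lv1/lv1_체육복.py | calc
-- ===== SOURCE A (Python) =====
-- def calc(lost, reserve) :
--     for lo in lost :
--         for re in reserve :
--             if re - 1 == lo or re + 1 == lo :
--                 reserve.remove(re)
--                 lost.remove(lo)
--                 return lost, reserve, True
--
--     return lost, reserve, False
-- ===== SOURCE B (Python) =====
-- def calc(lost, reserve):
--     # invert the adjacency: one pass over reserve registers, for each value it
--     # could cover (r-1 and r+1), the smallest reserve index that covers it;
--     # then the first lost element present in that map gives the pair directly.
--     cover = {}
--     for i, r in enumerate(reserve):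
--         for v in (r - 1, r + 1):
--             if v not in cover:
--                 cover[v] = i
--     for j, lo in enumerate(lost):
--         if lo in cover:
--             del reserve[cover[lo]]
--             del lost[j]
--             return lost, reserve, True
--     return lost, reserve, False
-- ===== Notes on version B (the rewrite author's own statement) =====
-- stated objective: faster
-- what changed: A rescans reserve for every lost element (nested loops); B inverts the adjacency: one pass over reserve builds a dict mapping each coverable value (r-1, r+1) to the smallest reserve index covering it, so the scan over lost is a single dict lookup per element with no neighbour probing of reserve, and removal is by the precomputed index.
import Mathlib
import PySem

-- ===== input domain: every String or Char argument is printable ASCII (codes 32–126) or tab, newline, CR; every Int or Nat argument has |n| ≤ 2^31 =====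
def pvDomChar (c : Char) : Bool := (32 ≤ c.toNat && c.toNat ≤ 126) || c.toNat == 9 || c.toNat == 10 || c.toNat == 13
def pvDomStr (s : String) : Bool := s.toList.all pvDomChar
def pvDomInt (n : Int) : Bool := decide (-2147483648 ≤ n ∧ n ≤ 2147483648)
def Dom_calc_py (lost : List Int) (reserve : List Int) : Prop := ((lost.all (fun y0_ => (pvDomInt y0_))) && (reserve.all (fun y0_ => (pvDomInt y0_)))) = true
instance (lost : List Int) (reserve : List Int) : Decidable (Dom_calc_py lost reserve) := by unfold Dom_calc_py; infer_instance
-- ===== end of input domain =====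

-- B replaces A's per-lost rescan of reserve (nested loops) by one pass over reserve building a
-- dict value↦smallest covering reserve index, then one dict lookup per lost element; both
-- versions mutate lost/reserve by removing one element, and the equivalence proved here is
-- about the returned triple.

-- ===== PORT A =====
-- inner loop: first re in reserve with re - 1 == lo or re + 1 == lo
def pvFindRe (lo : Int) : List Int → Option Int
  | [] => none
  | re :: rs => if re - 1 = lo ∨ re + 1 = lo then some re else pvFindRe lo rs

-- outer loop: first lo in lost whose inner loop fires
def pvFindLo (reserve : List Int) : List Int → Option (Int × Int)
  | [] => none
  | lo :: ls =>
    match pvFindRe lo reserve with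
    | some re => some (lo, re)
    | none => pvFindLo reserve ls

def calc_py (lost : List Int) (reserve : List Int) : List Int × List Int × Bool :=
  match pvFindLo reserve lost with
  | some (lo, re) =>
      ((PySem.List.remove? lost lo).getD lost,
       (PySem.List.remove? reserve re).getD reserve, true)
  | none => (lost, reserve, false)

-- ===== PORT B =====
-- for i, r in enumerate(reserve): for v in (r - 1, r + 1): if v not in cover: cover[v] = i
def pvCover : List (Int × Int) → PySem.Dict Int Int → PySem.Dict Int Int
  | [], d => d
  | (i, r) :: rest, d =>
      let d1 := if PySem.Dict.contains d (r - 1) then d else PySem.Dict.insert d (r - 1) i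
      let d2 := if PySem.Dict.contains d1 (r + 1) then d1 else PySem.Dict.insert d1 (r + 1) i
      pvCover rest d2

-- for j, lo in enumerate(lost): if lo in cover: return (j, cover[lo])
def pvBFind (cover : PySem.Dict Int Int) : List (Int × Int) → Option (Int × Int)
  | [] => none
  | (j, lo) :: rest =>
    match PySem.Dict.get? cover lo with
    | some i => some (j, i)
    | none => pvBFind cover rest

def calc_py_alt (lost : List Int) (reserve : List Int) : List Int × List Int × Bool :=
  let cover := pvCover (PySem.List.enumerate reserve) PySem.Dict.empty
  match pvBFind cover (PySem.List.enumerate lost) with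
  | some (j, i) =>
      (((PySem.List.pop? lost j).map (·.2)).getD lost,
       ((PySem.List.pop? reserve i).map (·.2)).getD reserve, true)
  | none => (lost, reserve, false)

-- ===== PRECONDITION & SPEC =====
def Spec_calc_py (lost : List Int) (reserve : List Int) (out : List Int × List Int × Bool) : Prop := out = calc_py_alt lost reserve
instance (lost : List Int) (reserve : List Int) (out : List Int × List Int × Bool) : Decidable (Spec_calc_py lost reserve out) := by unfold Spec_calc_py; infer_instance

-- ===== CLAIM (what is proved, stated in full; the proofs are below) =====
def Claim_equal_calc_py : Prop := ∀ (lost : List Int) (reserve : List Int), Dom_calc_py lost reserve → Spec_calc_py lost reserve (calc_py lost reserve)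

-- ===== LEMMAS AND PROOFS =====

-- what one enumerate pair contributes to a lookup of v in cover
def pvScan (v : Int) : List (Int × Int) → Option Int
  | [] => none
  | (i, r) :: rest => if r - 1 = v ∨ r + 1 = v then some i else pvScan v rest

theorem pvCover_step (d : PySem.Dict Int Int) (i r v : Int) :
    PySem.Dict.get?
      (let d1 := if PySem.Dict.contains d (r - 1) then d else PySem.Dict.insert d (r - 1) i
       if PySem.Dict.contains d1 (r + 1) then d1 else PySem.Dict.insert d1 (r + 1) i) v
    = Option.or (PySem.Dict.get? d v) (if r - 1 = v ∨ r + 1 = v then some i else none) := by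
  have hne : ((r + 1 : Int) == (r - 1)) = false := by simp; omega
  have e1 : (r - 1 : Int) ≠ r + 1 := by omega
  have hc1 := PySem.Dict.contains_eq_isSome_get? (d := d) (k := r - 1)
  have hc2 := PySem.Dict.contains_eq_isSome_get? (d := d) (k := r + 1)
  show PySem.Dict.get? (if PySem.Dict.contains (if PySem.Dict.contains d (r - 1) then d else PySem.Dict.insert d (r - 1) i) (r + 1) then _ else _) v = _
  have leaf : ∀ D : PySem.Dict Int Int,
      (PySem.Dict.get? D (r - 1) = Option.or (PySem.Dict.get? d (r - 1)) (some i)) →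
      (PySem.Dict.get? D (r + 1) = Option.or (PySem.Dict.get? d (r + 1)) (some i)) →
      (∀ u : Int, u ≠ r - 1 → u ≠ r + 1 → PySem.Dict.get? D u = PySem.Dict.get? d u) →
      PySem.Dict.get? D v = Option.or (PySem.Dict.get? d v) (if r - 1 = v ∨ r + 1 = v then some i else none) := by
    intro D hL hR hO
    by_cases hv1 : v = r - 1
    · subst hv1; rw [if_pos (Or.inl rfl)]; exact hL
    · by_cases hv2 : v = r + 1
      · subst hv2; rw [if_pos (Or.inr rfl)]; exact hR
      · rw [if_neg (by omega), hO v hv1 hv2]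
        cases PySem.Dict.get? d v <;> rfl
  cases hg1 : PySem.Dict.get? d (r - 1) with
  | some w1 =>
    rw [hg1, Option.isSome_some] at hc1
    simp only [hc1, if_true]
    cases hg2 : PySem.Dict.get? d (r + 1) with
    | some w2 =>
      rw [hg2, Option.isSome_some] at hc2
      simp only [hc2, if_true]
      exact leaf d (by rw [hg1]; rfl) (by rw [hg2]; rfl) (fun u _ _ => rfl)
    | none =>
      rw [hg2, Option.isSome_none] at hc2
      simp only [hc2, Bool.false_eq_true, if_false]
      refine leaf _ ?_ ?_ ?_
      · rw [PySem.Dict.get?_insert, if_neg e1, hg1]; rfl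
      · rw [PySem.Dict.get?_insert, if_pos rfl, hg2]; rfl
      · intro u h1 h2; rw [PySem.Dict.get?_insert, if_neg h2]
  | none =>
    rw [hg1, Option.isSome_none] at hc1
    simp only [hc1, Bool.false_eq_true, if_false]
    have hci : PySem.Dict.contains (PySem.Dict.insert d (r - 1) i) (r + 1)
        = PySem.Dict.contains d (r + 1) := by
      rw [PySem.Dict.contains_insert, hne, Bool.false_or]
    rw [hci]
    cases hg2 : PySem.Dict.get? d (r + 1) with
    | some w2 =>
      rw [hg2, Option.isSome_some] at hc2
      simp only [hc2, if_true]
      refine leaf _ ?_ ?_ ?_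
      · rw [PySem.Dict.get?_insert, if_pos rfl, hg1]; rfl
      · rw [PySem.Dict.get?_insert, if_neg e1.symm, hg2]; rfl
      · intro u h1 h2; rw [PySem.Dict.get?_insert, if_neg h1]
    | none =>
      rw [hg2, Option.isSome_none] at hc2
      simp only [hc2, Bool.false_eq_true, if_false]
      refine leaf _ ?_ ?_ ?_
      · rw [PySem.Dict.get?_insert, if_neg e1, PySem.Dict.get?_insert, if_pos rfl, hg1]; rfl
      · rw [PySem.Dict.get?_insert, if_pos rfl, hg2]; rfl
      · intro u h1 h2
        rw [PySem.Dict.get?_insert, if_neg h2, PySem.Dict.get?_insert, if_neg h1]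

theorem get?_pvCover (l : List (Int × Int)) (d : PySem.Dict Int Int) (v : Int) :
    PySem.Dict.get? (pvCover l d) v = Option.or (PySem.Dict.get? d v) (pvScan v l) := by
  induction l generalizing d with
  | nil => simp [pvCover, pvScan]
  | cons p rest ih =>
    obtain ⟨i, r⟩ := p
    show PySem.Dict.get? (pvCover rest _) v = _
    rw [ih, pvCover_step]
    have h3 : pvScan v ((i, r) :: rest)
        = Option.or (if r - 1 = v ∨ r + 1 = v then some i else none) (pvScan v rest) := by
      show (if r - 1 = v ∨ r + 1 = v then some i else pvScan v rest) = _
      split_ifs <;> simp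
    rw [h3, Option.or_assoc]

theorem pvScan_none_iff (v : Int) (reserve : List Int) (k : Int) :
    pvScan v (PySem.List.enumerate reserve k) = none ↔ pvFindRe v reserve = none := by
  induction reserve generalizing k with
  | nil => simp [pvScan, pvFindRe, PySem.List.enumerate_nil]
  | cons r rs ih =>
    rw [PySem.List.enumerate_cons]
    show (if r - 1 = v ∨ r + 1 = v then some k else pvScan v (PySem.List.enumerate rs (k + 1))) = none ↔ _
    by_cases h : r - 1 = v ∨ r + 1 = v
    · simp [pvFindRe, h]
    · simp only [ih, pvFindRe, if_neg h]

theorem pvFindRe_mem (lo : Int) (reserve : List Int) (re : Int)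
    (h : pvFindRe lo reserve = some re) : re = lo + 1 ∨ re = lo - 1 := by
  induction reserve with
  | nil => simp [pvFindRe] at h
  | cons r rs ih =>
    by_cases hc : r - 1 = lo ∨ r + 1 = lo
    · simp only [pvFindRe, if_pos hc] at h
      cases h; rcases hc with hc | hc
      · exact Or.inl (by omega)
      · exact Or.inr (by omega)
    · simp only [pvFindRe, if_neg hc] at h; exact ih h

-- the reserve index B precomputed is exactly where A's remove? cuts
theorem pvScanRe (reserve : List Int) (k : Int) (v re : Int)
    (h : pvFindRe v reserve = some re) :
    ∃ m : Nat, pvScan v (PySem.List.enumerate reserve k) = some (k + m) ∧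
      reserve[m]? = some re ∧
      PySem.List.remove? reserve re = some (reserve.eraseIdx m) := by
  induction reserve generalizing k with
  | nil => simp [pvFindRe] at h
  | cons r rs ih =>
    rw [PySem.List.enumerate_cons]
    by_cases hc : r - 1 = v ∨ r + 1 = v
    · have hc' : r - 1 = v ∨ r + 1 = v := hc
      simp only [pvFindRe, if_pos hc] at h
      injection h with h'
      subst h'
      refine ⟨0, ?_, by simp, PySem.List.remove?_cons_self r rs⟩
      show (if r - 1 = v ∨ r + 1 = v then some k else _) = some (k + (0 : Nat))
      rw [if_pos hc']; norm_num
    · simp only [pvFindRe, if_neg hc] at h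
      obtain ⟨m, hscan, hget, hrem⟩ := ih (k + 1) h
      have hre : re = v + 1 ∨ re = v - 1 := pvFindRe_mem v rs re h
      have hrne : r ≠ re := by omega
      refine ⟨m + 1, ?_, by simpa using hget, ?_⟩
      · show (if r - 1 = v ∨ r + 1 = v then some k else pvScan v (PySem.List.enumerate rs (k + 1))) = _
        rw [if_neg hc, hscan]
        congr 1; push_cast; ring
      · rw [PySem.List.remove?_cons_of_ne rs hrne, hrem]; rfl

theorem pvRemove_mid (pre rest : List Int) (lo : Int) (hpre : ∀ x ∈ pre, x ≠ lo) :
    PySem.List.remove? (pre ++ lo :: rest) lo = some (pre ++ rest) := by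
  induction pre with
  | nil => simpa using PySem.List.remove?_cons_self lo rest
  | cons p ps ih =>
    have hp : p ≠ lo := hpre p (by simp)
    rw [List.cons_append, PySem.List.remove?_cons_of_ne _ hp,
        ih (fun x hx => hpre x (by simp [hx]))]
    rfl

theorem pvEraseIdx_mid {α : Type} (pre rest : List α) (x : α) :
    (pre ++ x :: rest).eraseIdx pre.length = pre ++ rest := by
  induction pre with
  | nil => rfl
  | cons p ps ih => simpa [List.eraseIdx] using ih

theorem pvGet_mid {α : Type} (pre rest : List α) (x : α) :
    (pre ++ x :: rest)[pre.length]? = some x := by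
  induction pre with
  | nil => rfl
  | cons p ps ih => simpa using ih

theorem pvMain (suffix pre reserve : List Int)
    (hpre : ∀ x ∈ pre, pvFindRe x reserve = none) :
    (match pvFindLo reserve suffix with
     | some (lo, re) =>
        ((PySem.List.remove? (pre ++ suffix) lo).getD (pre ++ suffix),
         (PySem.List.remove? reserve re).getD reserve, true)
     | none => (pre ++ suffix, reserve, false))
    = (match pvBFind (pvCover (PySem.List.enumerate reserve) PySem.Dict.empty)
          (PySem.List.enumerate suffix (pre.length : Int)) with
     | some (j, i) =>
        (((PySem.List.pop? (pre ++ suffix) j).map (·.2)).getD (pre ++ suffix),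
         ((PySem.List.pop? reserve i).map (·.2)).getD reserve, true)
     | none => (pre ++ suffix, reserve, false)) := by
  induction suffix generalizing pre with
  | nil => simp [pvFindLo, PySem.List.enumerate, pvBFind]
  | cons lo rest ih =>
    rw [PySem.List.enumerate_cons]
    have hcov : PySem.Dict.get? (pvCover (PySem.List.enumerate reserve) PySem.Dict.empty) lo
        = pvScan lo (PySem.List.enumerate reserve) := by
      rw [get?_pvCover]; simp [PySem.Dict.get?_empty]
    cases hfr : pvFindRe lo reserve with
    | none =>
      have hscan : pvScan lo (PySem.List.enumerate reserve) = none :=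
        (pvScan_none_iff lo reserve 0).2 hfr
      have hb : pvBFind (pvCover (PySem.List.enumerate reserve) PySem.Dict.empty)
          (((pre.length : Int), lo) :: PySem.List.enumerate rest ((pre.length : Int) + 1))
          = pvBFind (pvCover (PySem.List.enumerate reserve) PySem.Dict.empty)
              (PySem.List.enumerate rest ((pre.length : Int) + 1)) := by
        simp [pvBFind, hcov, hscan]
      rw [hb]
      have hlen : ((pre ++ [lo]).length : Int) = (pre.length : Int) + 1 := by simp
      have := ih (pre ++ [lo]) (by
        intro x hx
        rcases List.mem_append.1 hx with hx | hx
        · exact hpre x hx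
        · simp at hx; subst hx; exact hfr)
      rw [hlen] at this
      simpa [pvFindLo, hfr, List.append_assoc] using this
    | some re =>
      obtain ⟨m, hscan, hget, hrem⟩ := pvScanRe reserve 0 lo re hfr
      have hscan' : pvScan lo (PySem.List.enumerate reserve) = some (m : Int) := by
        simpa using hscan
      have hb : pvBFind (pvCover (PySem.List.enumerate reserve) PySem.Dict.empty)
          (((pre.length : Int), lo) :: PySem.List.enumerate rest ((pre.length : Int) + 1))
          = some ((pre.length : Int), (m : Int)) := by
        simp [pvBFind, hcov, hscan']
      rw [hb]
      simp only [pvFindLo, hfr]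
      have hnolo : ∀ x ∈ pre, x ≠ lo := by
        intro x hx he; subst he
        rw [hpre x hx] at hfr; simp at hfr
      have hremL := pvRemove_mid pre rest lo hnolo
      have hmlen : m < reserve.length := (List.getElem?_eq_some_iff.1 hget).1
      have hmval : reserve[m] = re := by
        have := (List.getElem?_eq_some_iff.1 hget).2; simpa using this
      have hpopL : PySem.List.pop? (pre ++ lo :: rest) ((pre.length : Int))
          = some (lo, pre ++ rest) := by
        have hl : pre.length < (pre ++ lo :: rest).length := by simp
        rw [PySem.List.pop?_natCast (pre ++ lo :: rest) pre.length hl]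
        have h1 : (pre ++ lo :: rest)[pre.length] = lo := by
          have h2 := List.getElem?_eq_some_iff.1 (pvGet_mid pre rest lo)
          simpa using h2.2
        rw [h1, pvEraseIdx_mid]
      have hpopR := PySem.List.pop?_natCast reserve m hmlen
      rw [hremL, hrem, hpopL, hpopR, hmval]
      rfl

-- ===== VERDICT (by name: the statement is the Claim_ definition above) =====
theorem calc_py_spec : Claim_equal_calc_py := by
  intro lost reserve _
  unfold Spec_calc_py calc_py calc_py_alt
  have := pvMain lost [] reserve (by intro x hx; simp at hx)
  simpa using this
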